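-- pv_equiv track=rewrite | github.com/Mich120232024/bloomberg-volatility-component | tools/verify_remaining_ndfs.py | get_coverage_string
-- ===== SOURCE A (Python) =====
-- from typing import Dict, List
--
-- def get_coverage_string(tickers: List[Dict]) -> str:
--     """Get coverage string from ticker list"""
--     tenors = []
--     for ticker_data in tickers:
--         ticker = ticker_data["ticker"]
--         for tenor in ["1W", "2W", "1M", "2M", "3M", "6M", "9M", "1Y", "2Y", "3Y", "5Y"]:
--             if tenor in ticker:
--                 tenors.append(tenor)
--                 break
--
--     if not tenors:
--         return "Unknown"
--
--     # Sort tenors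
--     tenor_order = ["1W", "2W", "1M", "2M", "3M", "6M", "9M", "1Y", "2Y", "3Y", "5Y"]
--     sorted_tenors = sorted(set(tenors), key=lambda x: tenor_order.index(x) if x in tenor_order else 99)
--
--     if len(sorted_tenors) > 2:
--         return f"{sorted_tenors[0]}-{sorted_tenors[-1]}"
--     else:
--         return ", ".join(sorted_tenors)
-- ===== SOURCE B (Python) =====
-- def get_coverage_string(tickers):
--     """Get coverage string from ticker list"""
--     order = ["1W", "2W", "1M", "2M", "3M", "6M", "9M", "1Y", "2Y", "3Y", "5Y"]
--     mask = 0
--     for ticker_data in tickers: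
--         ticker = ticker_data["ticker"]
--         for i, tenor in enumerate(order):
--             if tenor in ticker:
--                 mask |= 1 << i
--                 break
--
--     if mask == 0:
--         return "Unknown"
--
--     lo = (mask ^ (mask & (mask - 1))).bit_length() - 1   # index of lowest set bit
--     hi = mask.bit_length() - 1                           # index of highest set bit
--     if bin(mask).count("1") > 2:
--         return order[lo] + "-" + order[hi]
--     if lo == hi:
--         return order[lo]
--     return order[lo] + ", " + order[hi]
-- ===== Notes on version B (the rewrite author's own statement) =====
-- stated objective: alternative
-- what changed: B records each ticker's first matching tenor as a bit in an 11-bit presence bitmask and derives the output from the mask's lowest set bit, highest set bit and popcount, replacing A's appended list + sorted(set(...), key=tenor_order.index) + join pipeline.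
import Mathlib
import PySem

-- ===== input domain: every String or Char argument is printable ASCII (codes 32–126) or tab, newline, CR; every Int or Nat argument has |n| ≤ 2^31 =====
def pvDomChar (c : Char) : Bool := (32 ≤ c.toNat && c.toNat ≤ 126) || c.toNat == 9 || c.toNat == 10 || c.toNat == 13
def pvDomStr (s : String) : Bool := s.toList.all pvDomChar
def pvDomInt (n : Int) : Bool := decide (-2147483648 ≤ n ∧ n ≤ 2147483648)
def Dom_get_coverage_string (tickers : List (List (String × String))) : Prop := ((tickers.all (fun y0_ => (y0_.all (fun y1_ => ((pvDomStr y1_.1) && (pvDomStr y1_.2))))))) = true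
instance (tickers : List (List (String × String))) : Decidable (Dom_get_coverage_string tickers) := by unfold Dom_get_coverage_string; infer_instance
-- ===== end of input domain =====

-- B replaces A's tenor list + sorted(set(...), key=index) + join pipeline by an 11-bit
-- presence bitmask whose lowest/highest set bit and popcount drive the output (objective: alternative).

-- the canonical tenor list, shared verbatim by both Pythons
def pvTenorOrder : List String := ["1W", "2W", "1M", "2M", "3M", "6M", "9M", "1Y", "2Y", "3Y", "5Y"]

-- ===== PORT A =====
def get_coverage_string (tickers : List (List (String × String))) : String :=
  let tenors : List String := tickers.foldl (fun acc ticker_data =>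
      let ticker := (PySem.Dict.get? (PySem.Dict.mk ticker_data) "ticker").getD ""   -- KeyError excluded by Pre_
      match pvTenorOrder.find? (fun tenor => PySem.Str.isIn tenor ticker) with  -- for…if…break
      | some tenor => acc ++ [tenor]
      | none => acc) []
  if tenors = [] then "Unknown"
  else
    let sorted_tenors := PySem.List.sorted (PySem.Set.ofList tenors)
      (fun x => match PySem.List.index? pvTenorOrder x with
                | some k => (k : Int)
                | none => 99) false
    if 2 < sorted_tenors.length then
      PySem.List.pyGetD sorted_tenors 0 "" ++ "-" ++ PySem.List.pyGetD sorted_tenors (-1) ""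
    else
      PySem.Str.join ", " sorted_tenors

-- ===== PORT B =====
-- n.bit_length() for n ≥ 0, exactly (0 for 0, else position of highest set bit + 1);
-- structural recursion on a fuel bounding the recursion depth (n/2 < n), so the kernel reduces it
def pvBitLengthGo : Nat → Nat → Nat
  | _, 0 => 0
  | 0, _+1 => 0   -- never reached: fuel ≥ n suffices
  | fuel+1, n+1 => pvBitLengthGo fuel ((n+1)/2) + 1
def pvBitLength (n : Nat) : Nat := pvBitLengthGo n n

-- bin(n).count("1") for n ≥ 0, exactly (number of 1-bits); same fuel pattern
def pvPopcountGo : Nat → Nat → Nat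
  | _, 0 => 0
  | 0, _+1 => 0   -- never reached: fuel ≥ n suffices
  | fuel+1, n+1 => (n+1) % 2 + pvPopcountGo fuel ((n+1)/2)
def pvPopcount (n : Nat) : Nat := pvPopcountGo n n

def get_coverage_string_alt (tickers : List (List (String × String))) : String :=
  let mask : Nat := tickers.foldl (fun m ticker_data =>
      let ticker := (PySem.Dict.get? (PySem.Dict.mk ticker_data) "ticker").getD ""   -- KeyError excluded by Pre_
      match (PySem.List.enumerate pvTenorOrder 0).find? (fun it => PySem.Str.isIn it.2 ticker) with  -- for i,tenor…if…break
      | some it => m ||| (1 <<< it.1.toNat)   -- the index from enumerate(order) is ≥ 0, so toNat is exact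
      | none => m) 0
  if mask = 0 then "Unknown"
  else
    let lo := pvBitLength (mask ^^^ (mask &&& (mask - 1))) - 1   -- index of lowest set bit
    let hi := pvBitLength mask - 1                               -- index of highest set bit
    if 2 < pvPopcount mask then
      PySem.List.pyGetD pvTenorOrder (lo : Int) "" ++ "-" ++ PySem.List.pyGetD pvTenorOrder (hi : Int) ""
    else if lo = hi then
      PySem.List.pyGetD pvTenorOrder (lo : Int) ""
    else
      PySem.List.pyGetD pvTenorOrder (lo : Int) "" ++ ", " ++ PySem.List.pyGetD pvTenorOrder (hi : Int) ""

-- ===== PRECONDITION & SPEC =====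
-- A does ticker_data["ticker"]: a dict without that key makes A raise KeyError, so it is outside Pre_.
def Pre_get_coverage_string (tickers : List (List (String × String))) : Prop :=
  ∀ d ∈ tickers, (PySem.Dict.get? (PySem.Dict.mk d) "ticker").isSome = true
instance (tickers : List (List (String × String))) : Decidable (Pre_get_coverage_string tickers) := by unfold Pre_get_coverage_string; infer_instance

def pvWitness_get_coverage_string : (List (List (String × String))) :=
  [[("ticker", "USDBRL1M Curncy")], [("ticker", "XY5Y")]]

def Spec_get_coverage_string (tickers : List (List (String × String))) (out : String) : Prop := out = get_coverage_string_alt tickers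
instance (tickers : List (List (String × String))) (out : String) : Decidable (Spec_get_coverage_string tickers out) := by unfold Spec_get_coverage_string; infer_instance

-- ===== CLAIM (what is proved, stated in full; the proofs are below) =====
def Claim_equal_get_coverage_string : Prop := ∀ (tickers : List (List (String × String))), Dom_get_coverage_string tickers → Pre_get_coverage_string tickers → Spec_get_coverage_string tickers (get_coverage_string tickers)

-- ===== LEMMAS AND PROOFS =====

-- index of a tenor in the canonical list
def pvIdxOf (x : String) : Nat := (PySem.List.index? pvTenorOrder x).getD 0

-- mask of a tenor list, folded from m
def pvMaskFrom (xs : List String) (m : Nat) : Nat := xs.foldl (fun m x => m ||| (1 <<< pvIdxOf x)) m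

-- the canonical tenors whose bit is set in m, in canonical order
def pvFilterMask (m : Nat) : List String := pvTenorOrder.filter (fun t => m.testBit (pvIdxOf t))

-- the per-ticker step of A's loop, resp. of B's loop (η-equal to the ports' fold lambdas)
def pvAStep (acc : List String) (ticker_data : List (String × String)) : List String :=
  let ticker := (PySem.Dict.get? (PySem.Dict.mk ticker_data) "ticker").getD ""
  match pvTenorOrder.find? (fun tenor => PySem.Str.isIn tenor ticker) with
  | some tenor => acc ++ [tenor]
  | none => acc

def pvBStep (m : Nat) (ticker_data : List (String × String)) : Nat :=
  let ticker := (PySem.Dict.get? (PySem.Dict.mk ticker_data) "ticker").getD ""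
  match (PySem.List.enumerate pvTenorOrder 0).find? (fun it => PySem.Str.isIn it.2 ticker) with
  | some it => m ||| (1 <<< it.1.toNat)
  | none => m

-- B's enumerate-find is A's find paired with the canonical index
theorem pv_find_enum (t : String) :
    (PySem.List.enumerate pvTenorOrder 0).find? (fun it => PySem.Str.isIn it.2 t)
      = (pvTenorOrder.find? (fun tn => PySem.Str.isIn tn t)).map
          (fun tn => ((pvIdxOf tn : Int), tn)) := by
  have he : PySem.List.enumerate pvTenorOrder 0 =
    [((0:Int),"1W"),(1,"2W"),(2,"1M"),(3,"2M"),(4,"3M"),(5,"6M"),(6,"9M"),(7,"1Y"),(8,"2Y"),(9,"3Y"),(10,"5Y")] := by decide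
  rw [he]
  simp only [pvTenorOrder, List.find?]
  by_cases h0 : PySem.Str.isIn "1W" t
  · simp only [h0]; decide
  rw [Bool.not_eq_true] at h0
  by_cases h1 : PySem.Str.isIn "2W" t
  · simp only [h0, h1]; decide
  rw [Bool.not_eq_true] at h1
  by_cases h2 : PySem.Str.isIn "1M" t
  · simp only [h0, h1, h2]; decide
  rw [Bool.not_eq_true] at h2
  by_cases h3 : PySem.Str.isIn "2M" t
  · simp only [h0, h1, h2, h3]; decide
  rw [Bool.not_eq_true] at h3
  by_cases h4 : PySem.Str.isIn "3M" t
  · simp only [h0, h1, h2, h3, h4]; decide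
  rw [Bool.not_eq_true] at h4
  by_cases h5 : PySem.Str.isIn "6M" t
  · simp only [h0, h1, h2, h3, h4, h5]; decide
  rw [Bool.not_eq_true] at h5
  by_cases h6 : PySem.Str.isIn "9M" t
  · simp only [h0, h1, h2, h3, h4, h5, h6]; decide
  rw [Bool.not_eq_true] at h6
  by_cases h7 : PySem.Str.isIn "1Y" t
  · simp only [h0, h1, h2, h3, h4, h5, h6, h7]; decide
  rw [Bool.not_eq_true] at h7
  by_cases h8 : PySem.Str.isIn "2Y" t
  · simp only [h0, h1, h2, h3, h4, h5, h6, h7, h8]; decide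
  rw [Bool.not_eq_true] at h8
  by_cases h9 : PySem.Str.isIn "3Y" t
  · simp only [h0, h1, h2, h3, h4, h5, h6, h7, h8, h9]; decide
  rw [Bool.not_eq_true] at h9
  by_cases h10 : PySem.Str.isIn "5Y" t
  · simp only [h0, h1, h2, h3, h4, h5, h6, h7, h8, h9, h10]; decide
  rw [Bool.not_eq_true] at h10
  simp only [h0, h1, h2, h3, h4, h5, h6, h7, h8, h9, h10, Option.map_none]

theorem pvBStep_eq (m : Nat) (d : List (String × String)) :
    pvBStep m d = match pvTenorOrder.find? (fun tenor => PySem.Str.isIn tenor ((PySem.Dict.get? (PySem.Dict.mk d) "ticker").getD "")) with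
      | some tn => m ||| (1 <<< pvIdxOf tn)
      | none => m := by
  unfold pvBStep
  dsimp only
  rw [pv_find_enum]
  cases h : pvTenorOrder.find? (fun tn => PySem.Str.isIn tn ((PySem.Dict.get? (PySem.Dict.mk d) "ticker").getD "")) <;> simp

-- B's fold over tickers is the mask of A's tenor list
theorem pv_fold_mask (tickers : List (List (String × String))) :
    ∀ acc : List String,
    tickers.foldl pvBStep (pvMaskFrom acc 0) = pvMaskFrom (tickers.foldl pvAStep acc) 0 := by
  induction tickers with
  | nil => intro acc; rfl
  | cons d rest ih =>
    intro acc
    simp only [List.foldl_cons, pvBStep_eq]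
    cases h : pvTenorOrder.find? (fun tn => PySem.Str.isIn tn ((PySem.Dict.get? (PySem.Dict.mk d) "ticker").getD "")) with
    | none =>
      have hA : pvAStep acc d = acc := by unfold pvAStep; dsimp only; rw [h]
      dsimp only
      rw [hA]; exact ih acc
    | some tn =>
      have hA : pvAStep acc d = acc ++ [tn] := by unfold pvAStep; dsimp only; rw [h]
      have hstep : pvMaskFrom acc 0 ||| (1 <<< pvIdxOf tn) = pvMaskFrom (acc ++ [tn]) 0 := by
        simp [pvMaskFrom, List.foldl_append]
      dsimp only
      rw [hA, hstep]; exact ih (acc ++ [tn])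

-- every tenor A appends comes from pvTenorOrder
theorem pv_fold_mem (tickers : List (List (String × String))) (acc : List String) :
    ∀ x ∈ tickers.foldl pvAStep acc, x ∈ acc ∨ x ∈ pvTenorOrder := by
  induction tickers generalizing acc with
  | nil => intro x hx; exact Or.inl hx
  | cons d rest ih =>
    intro x hx
    simp only [List.foldl_cons] at hx
    cases h : pvTenorOrder.find? (fun tenor => PySem.Str.isIn tenor ((PySem.Dict.get? (PySem.Dict.mk d) "ticker").getD "")) with
    | none =>
      have hA : pvAStep acc d = acc := by unfold pvAStep; dsimp only; rw [h]
      rw [hA] at hx; exact ih acc x hx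
    | some tn =>
      have hA : pvAStep acc d = acc ++ [tn] := by unfold pvAStep; dsimp only; rw [h]
      rw [hA] at hx
      have htn : tn ∈ pvTenorOrder := List.mem_of_find?_eq_some h
      rcases ih (acc ++ [tn]) x hx with hm | hm
      · rcases List.mem_append.mp hm with hm | hm
        · exact Or.inl hm
        · right; simp at hm; exact hm ▸ htn
      · exact Or.inr hm

-- testBit of the mask is membership of the index
theorem pv_testBit_maskFrom (xs : List String) (m : Nat) (j : Nat) :
    (pvMaskFrom xs m).testBit j = (m.testBit j || xs.any (fun x => pvIdxOf x == j)) := by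
  induction xs generalizing m with
  | nil => simp [pvMaskFrom]
  | cons x xs ih =>
    have h1 : pvMaskFrom (x :: xs) m = pvMaskFrom xs (m ||| (1 <<< pvIdxOf x)) := rfl
    rw [h1, ih]
    simp only [Nat.testBit_or, Nat.one_shiftLeft, Nat.testBit_two_pow, List.any_cons]
    cases m.testBit j <;> cases hx : (pvIdxOf x == j) <;> simp_all

theorem pv_idx_inj : ∀ x ∈ pvTenorOrder, ∀ y ∈ pvTenorOrder, pvIdxOf x = pvIdxOf y → x = y := by decide

theorem pv_idx_lt : ∀ x ∈ pvTenorOrder, pvIdxOf x < 11 := by decide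

-- the mask stays below 2^11
theorem pv_mask_lt (xs : List String) (m : Nat) (hm : m < 2048)
    (hs : ∀ x ∈ xs, x ∈ pvTenorOrder) : pvMaskFrom xs m < 2048 := by
  induction xs generalizing m with
  | nil => exact hm
  | cons x xs ih =>
    have hx : x ∈ pvTenorOrder := hs x (List.mem_cons_self ..)
    have hi : pvIdxOf x < 11 := pv_idx_lt x hx
    have hlt : m ||| (1 <<< pvIdxOf x) < 2048 := by
      have h2 : (1 <<< pvIdxOf x) < 2048 := by
        rw [Nat.one_shiftLeft]
        calc (2:Nat) ^ pvIdxOf x < 2 ^ 11 := Nat.pow_lt_pow_right one_lt_two hi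
        _ = 2048 := by norm_num
      exact Nat.or_lt_two_pow (n := 11) hm h2
    exact ih _ hlt (fun y hy => hs y (List.mem_cons_of_mem _ hy))

-- sorting a nodup subset of pvTenorOrder by index = filtering pvTenorOrder by membership
theorem pv_sorted_eq_filter (S : List String) (hnd : S.Nodup)
    (hsub : ∀ x ∈ S, x ∈ pvTenorOrder) :
    PySem.List.sorted S
      (fun x => match PySem.List.index? pvTenorOrder x with
                | some k => (k : Int) | none => 99) false
    = pvTenorOrder.filter (fun t => PySem.Set.contains S t) := by
  apply PySem.List.sorted_eq_of_perm_of_pairwise_lt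
  · rw [List.perm_ext_iff_of_nodup (List.Nodup.filter _ (by decide)) hnd]
    intro a
    simp only [List.mem_filter, PySem.Set.contains_iff]
    constructor
    · rintro ⟨-, h⟩; exact h
    · intro h; exact ⟨hsub a h, h⟩
  · apply List.Pairwise.filter
    decide

-- the membership filter is the bitmask filter
theorem pv_filter_eq_mask (tenors : List String)
    (hsub : ∀ x ∈ tenors, x ∈ pvTenorOrder) :
    pvTenorOrder.filter (fun t => PySem.Set.contains (PySem.Set.ofList tenors) t)
      = pvFilterMask (pvMaskFrom tenors 0) := by
  unfold pvFilterMask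
  apply List.filter_congr
  intro t ht
  rw [pv_testBit_maskFrom]
  simp only [Nat.zero_testBit, Bool.false_or]
  rw [Bool.eq_iff_iff]
  constructor
  · intro hc
    have hmem : t ∈ tenors := (PySem.Set.mem_ofList tenors t).mp ((PySem.Set.contains_iff _ _).mp hc)
    rw [List.any_eq_true]
    exact ⟨t, hmem, by simp⟩
  · intro ha
    rcases List.any_eq_true.mp ha with ⟨x, hx, hbeq⟩
    have hxe : x = t := pv_idx_inj x (hsub x hx) t ht (by simpa using hbeq)
    exact (PySem.Set.contains_iff _ _).mpr ((PySem.Set.mem_ofList tenors t).mpr (hxe ▸ hx))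

-- a nonempty tenor list gives a nonzero mask
theorem pv_mask_ne_zero (tenors : List String) (h : tenors ≠ []) :
    pvMaskFrom tenors 0 ≠ 0 := by
  cases tenors with
  | nil => exact absurd rfl h
  | cons x xs =>
    intro h0
    have hbit : (pvMaskFrom (x :: xs) 0).testBit (pvIdxOf x) = true := by
      rw [pv_testBit_maskFrom]; simp
    rw [h0] at hbit
    simp [Nat.zero_testBit] at hbit

-- the two output stages agree for every nonzero 11-bit mask
set_option maxRecDepth 100000 in
set_option maxHeartbeats 2000000 in
theorem pv_final : ∀ m < 2048, m ≠ 0 →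
    (if 2 < (pvFilterMask m).length then
      PySem.List.pyGetD (pvFilterMask m) 0 "" ++ "-" ++ PySem.List.pyGetD (pvFilterMask m) (-1) ""
    else
      PySem.Str.join ", " (pvFilterMask m))
    =
    (if 2 < pvPopcount m then
      PySem.List.pyGetD pvTenorOrder ((pvBitLength (m ^^^ (m &&& (m - 1))) - 1 : Nat) : Int) "" ++ "-" ++
        PySem.List.pyGetD pvTenorOrder ((pvBitLength m - 1 : Nat) : Int) ""
    else if (pvBitLength (m ^^^ (m &&& (m - 1))) - 1 : Nat) = (pvBitLength m - 1 : Nat) then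
      PySem.List.pyGetD pvTenorOrder ((pvBitLength (m ^^^ (m &&& (m - 1))) - 1 : Nat) : Int) ""
    else
      PySem.List.pyGetD pvTenorOrder ((pvBitLength (m ^^^ (m &&& (m - 1))) - 1 : Nat) : Int) "" ++ ", " ++
        PySem.List.pyGetD pvTenorOrder ((pvBitLength m - 1 : Nat) : Int) "") := by
  decide

-- ===== VERDICT =====
theorem get_coverage_string_spec : Claim_equal_get_coverage_string := by
  intro tickers _ _
  unfold Spec_get_coverage_string get_coverage_string get_coverage_string_alt
  have hBl : (fun (m : Nat) (ticker_data : List (String × String)) =>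
      let ticker := (PySem.Dict.get? (PySem.Dict.mk ticker_data) "ticker").getD ""
      match (PySem.List.enumerate pvTenorOrder 0).find? (fun it => PySem.Str.isIn it.2 ticker) with
      | some it => m ||| (1 <<< it.1.toNat)
      | none => m) = pvBStep := rfl
  have hAl : (fun (acc : List String) (ticker_data : List (String × String)) =>
      let ticker := (PySem.Dict.get? (PySem.Dict.mk ticker_data) "ticker").getD ""
      match pvTenorOrder.find? (fun tenor => PySem.Str.isIn tenor ticker) with
      | some tenor => acc ++ [tenor]
      | none => acc) = pvAStep := rfl
  rw [hBl, hAl]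
  have hM : tickers.foldl pvBStep 0 = pvMaskFrom (tickers.foldl pvAStep []) 0 :=
    pv_fold_mask tickers []
  rw [hM]
  set tenors := tickers.foldl pvAStep [] with htenors
  by_cases hnil : tenors = []
  · rw [hnil]
    simp [pvMaskFrom]
  · have hne0 := pv_mask_ne_zero tenors hnil
    rw [if_neg hnil, if_neg hne0]
    have hsub : ∀ x ∈ tenors, x ∈ pvTenorOrder := by
      intro x hx
      rcases pv_fold_mem tickers [] x (htenors ▸ hx) with h | h
      · simp at h
      · exact h
    have hsubS : ∀ x ∈ PySem.Set.ofList tenors, x ∈ pvTenorOrder := by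
      intro x hx; exact hsub x ((PySem.Set.mem_ofList tenors x).mp hx)
    rw [pv_sorted_eq_filter (PySem.Set.ofList tenors) (PySem.Set.nodup_ofList tenors) hsubS]
    rw [pv_filter_eq_mask tenors hsub]
    exact pv_final (pvMaskFrom tenors 0) (pv_mask_lt tenors 0 (by norm_num) hsub) hne0
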